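-- pv_equiv track=rewrite | github.com/yskang/AlgorithmPractice | baekjoon/fly_me_to_the_Alpha_Centauri_1011.py | count_of_warp
-- ===== SOURCE A (Python) =====
-- def count_of_warp(points):
--     distance = points[1] - points[0]
--     warp_count = 0
--     warp_dist = 1
--
--     while distance > warp_dist:
--         warp_count += 1
--         distance = distance - 2*warp_dist
--         if distance < 0:
--             distance = distance + 2*warp_dist
--             warp_dist -= 1
--             warp_count -= 1
--             break
--         warp_dist += 1
--
--     if distance == 0:
--         return warp_count * 2
--     elif distance > warp_dist:
--         return warp_count * 2 + 2
--     return warp_count * 2 + 1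
-- ===== SOURCE B (Python) =====
-- def count_of_warp(points):
--     d = points[1] - points[0]
--     if d == 0:
--         return 0
--     # binary search for k = floor(sqrt(d))
--     lo, hi = 0, d
--     while lo < hi:
--         mid = (lo + hi + 1) // 2
--         if mid * mid <= d:
--             lo = mid
--         else:
--             hi = mid - 1
--     k = lo
--     if k * k == d:
--         return 2 * k - 1
--     if d <= k * k + k:
--         return 2 * k
--     return 2 * k + 1
-- ===== Notes on version B (the rewrite author's own statement) =====
-- stated objective: faster
-- what changed: Replaced A's step-by-step warp simulation (incrementing warp distance until the remaining distance is consumed) by a binary-search integer square root to locate the band k = floor(sqrt(d)) and a closed-form three-way case split.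
-- outside the precondition, e.g. on count_of_warp([3, 1]): A returns 1, B returns 0
import Mathlib
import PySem

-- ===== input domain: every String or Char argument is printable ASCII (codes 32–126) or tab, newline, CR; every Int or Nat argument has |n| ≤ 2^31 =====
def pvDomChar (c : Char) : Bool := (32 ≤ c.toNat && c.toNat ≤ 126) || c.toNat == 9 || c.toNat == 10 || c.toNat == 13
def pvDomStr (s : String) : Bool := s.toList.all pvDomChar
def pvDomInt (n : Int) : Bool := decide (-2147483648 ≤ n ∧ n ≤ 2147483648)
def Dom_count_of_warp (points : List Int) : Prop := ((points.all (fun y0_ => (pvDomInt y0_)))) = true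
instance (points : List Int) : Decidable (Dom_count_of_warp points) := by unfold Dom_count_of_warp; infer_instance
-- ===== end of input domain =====

-- B replaces A's warp-by-warp simulation with a binary-search integer square root
-- plus a closed-form case split (measurably faster on large distances).

-- ===== PORT A =====
-- while distance > warp_dist: … (state = (distance, warp_count, warp_dist)); the fuel
-- argument only makes the loop total — distance.toNat + 1 always suffices (proved below).
def aLoop : Nat → Int → Int → Int → Int × Int × Int
  | 0, dist, wc, wd => (dist, wc, wd)
  | fuel + 1, dist, wc, wd =>
    if wd < dist then
      if dist - 2 * wd < 0 then (dist, wc, wd - 1)       -- break branch (distance restored)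
      else aLoop fuel (dist - 2 * wd) (wc + 1) (wd + 1)
    else (dist, wc, wd)

def count_of_warp (points : List Int) : Int :=
  let distance := (PySem.List.pyGet? points 1).getD 0 - (PySem.List.pyGet? points 0).getD 0
  let s := aLoop (distance.toNat + 1) distance 0 1
  if s.1 = 0 then s.2.1 * 2
  else if s.2.2 < s.1 then s.2.1 * 2 + 2
  else s.2.1 * 2 + 1

-- ===== PORT B =====
-- binary search for floor(sqrt d) on [lo, hi]; the fuel argument only makes the
-- while-loop total — (hi - lo).toNat + 1 always suffices (the gap shrinks each step).
def bSearch : Nat → Int → Int → Int → Int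
  | 0, _d, lo, _hi => lo
  | fuel + 1, d, lo, hi =>
    if lo < hi then
      let mid := PySem.Int.floordiv (lo + hi + 1) 2
      if mid * mid ≤ d then bSearch fuel d mid hi else bSearch fuel d lo (mid - 1)
    else lo

def count_of_warp_alt (points : List Int) : Int :=
  let d := (PySem.List.pyGet? points 1).getD 0 - (PySem.List.pyGet? points 0).getD 0
  if d = 0 then 0
  else
    let k := bSearch (d.toNat + 1) d 0 d
    if k * k = d then 2 * k - 1
    else if d ≤ k * k + k then 2 * k
    else 2 * k + 1

-- ===== PRECONDITION & SPEC =====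
-- Pre_ excludes lists shorter than 2 (A raises IndexError) and pairs with points[1] < points[0]:
-- a negative distance is outside the problem's domain and there A's 1 and B's 0 are both
-- accidental values neither specification would fix.
def Pre_count_of_warp (points : List Int) : Prop :=
  2 ≤ points.length ∧ points.getD 0 0 ≤ points.getD 1 0
instance (points : List Int) : Decidable (Pre_count_of_warp points) := by
  unfold Pre_count_of_warp; infer_instance

def pvWitness_count_of_warp : List Int := [0, 5]

def Spec_count_of_warp (points : List Int) (out : Int) : Prop := out = count_of_warp_alt points
instance (points : List Int) (out : Int) : Decidable (Spec_count_of_warp points out) := by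
  unfold Spec_count_of_warp; infer_instance

-- ===== CLAIM (what is proved, stated in full; the proofs are below) =====
def Claim_equal_count_of_warp : Prop := ∀ (points : List Int), Dom_count_of_warp points → Pre_count_of_warp points → Spec_count_of_warp points (count_of_warp points)

-- ===== LEMMAS AND PROOFS =====

-- final answer A computes from the loop's exit state
def ansA (s : Int × Int × Int) : Int :=
  if s.1 = 0 then s.2.1 * 2
  else if s.2.2 < s.1 then s.2.1 * 2 + 2
  else s.2.1 * 2 + 1

-- B's closed form, given k with k*k ≤ d < (k+1)*(k+1)
def ansB (d k : Int) : Int :=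
  if k * k = d then 2 * k - 1
  else if d ≤ k * k + k then 2 * k
  else 2 * k + 1

theorem bSearch_spec (d : Int) : ∀ (n : Nat) (lo hi : Int), (hi - lo).toNat ≤ n →
    0 ≤ lo → lo ≤ hi → lo * lo ≤ d → d < (hi + 1) * (hi + 1) →
    0 ≤ bSearch n d lo hi ∧ bSearch n d lo hi * bSearch n d lo hi ≤ d ∧
      d < (bSearch n d lo hi + 1) * (bSearch n d lo hi + 1) := by
  intro n
  induction n with
  | zero =>
    intro lo hi hn h0 hlh hsq hub
    have : lo = hi := by omega
    subst this
    exact ⟨h0, hsq, hub⟩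
  | succ n ih =>
    intro lo hi hn h0 hlh hsq hub
    by_cases h : lo < hi
    · simp only [bSearch]
      rw [if_pos h]
      have hm : PySem.Int.floordiv (lo + hi + 1) 2 = (lo + hi + 1) / 2 :=
        PySem.Int.floordiv_eq_ediv_of_pos (by omega)
      simp only [hm]
      set mid := (lo + hi + 1) / 2 with hmid
      have hb : lo < mid ∧ mid ≤ hi := by omega
      by_cases hle : mid * mid ≤ d
      · rw [if_pos hle]
        exact ih mid hi (by omega) (by omega) (by omega) hle hub
      · rw [if_neg hle]
        refine ih lo (mid - 1) (by omega) h0 (by omega) hsq ?_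
        have e : mid - 1 + 1 = mid := by ring
        rw [e]; omega
    · simp only [bSearch]
      rw [if_neg h]
      have : lo = hi := by omega
      subst this
      exact ⟨h0, hsq, hub⟩

theorem sq_mono {a b : Int} (ha : 0 ≤ a) (hab : a ≤ b) : a * a ≤ b * b := by nlinarith

-- core invariant: from state (d - i*(i+1), i, i+1) A's loop yields B's closed form,
-- provided k is the integer square root of d.
theorem loop_main : ∀ (fuel : Nat) (d i k : Int), 1 ≤ d → 0 ≤ i → i * (i + 1) ≤ d →
    (d - i * (i + 1)).toNat ≤ fuel → 0 ≤ k → k * k ≤ d → d < (k + 1) * (k + 1) →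
    ansA (aLoop fuel (d - i * (i + 1)) i (i + 1)) = ansB d k := by
  intro fuel
  induction fuel with
  | zero =>
    intro d i k hd hi hreach hfuel hk hk1 hk2
    have hdi : d - i * (i + 1) = 0 := by omega
    have hki : k = i := by
      rcases lt_trichotomy k i with h | h | h
      · exfalso; have := sq_mono (a := k + 1) (b := i) (by omega) (by omega); nlinarith
      · exact h
      · exfalso; have := sq_mono (a := i + 1) (b := k) (by omega) (by omega); nlinarith
    subst hki
    have h1 : ¬ (k * k = d) := by intro h; nlinarith
    have h2 : d ≤ k * k + k := by nlinarith
    simp only [aLoop, ansA, ansB]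
    rw [if_pos hdi, if_neg h1, if_pos h2]
    ring
  | succ fuel ih =>
    intro d i k hd hi hreach hfuel hk hk1 hk2
    by_cases hcont : i + 1 < d - i * (i + 1)
    · by_cases hbrk : d - i * (i + 1) - 2 * (i + 1) < 0
      · -- break: (i+1)^2 < d < (i+1)*(i+2), answer 2*i + 2, k = i+1
        have hki : k = i + 1 := by
          rcases lt_trichotomy k (i + 1) with h | h | h
          · exfalso; have := sq_mono (a := k + 1) (b := i + 1) (by omega) (by omega); nlinarith
          · exact h
          · exfalso; have := sq_mono (a := i + 2) (b := k) (by omega) (by omega); nlinarith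
        subst hki
        have h0 : ¬ (d - i * (i + 1) = 0) := by omega
        have h1 : i + 1 - 1 < d - i * (i + 1) := by omega
        have h2 : ¬ ((i + 1) * (i + 1) = d) := by intro h; nlinarith
        have h3 : d ≤ (i + 1) * (i + 1) + (i + 1) := by nlinarith
        simp only [aLoop, if_pos hcont, if_pos hbrk, ansA, ansB]
        rw [if_neg h0, if_pos h1, if_neg h2, if_pos h3]
        ring
      · -- continue to state i+1
        have step : d - i * (i + 1) - 2 * (i + 1) = d - (i + 1) * (i + 1 + 1) := by ring
        simp only [aLoop, if_pos hcont, if_neg hbrk]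
        rw [step]
        exact ih d (i + 1) k hd (by omega) (by omega) (by omega) hk hk1 hk2
    · -- loop exits: d - i*(i+1) ≤ i+1
      by_cases hdi0 : d - i * (i + 1) = 0
      · have hki : k = i := by
          rcases lt_trichotomy k i with h | h | h
          · exfalso; have := sq_mono (a := k + 1) (b := i) (by omega) (by omega); nlinarith
          · exact h
          · exfalso; have := sq_mono (a := i + 1) (b := k) (by omega) (by omega); nlinarith
        subst hki
        have h1 : ¬ (k * k = d) := by intro h; nlinarith
        have h2 : d ≤ k * k + k := by nlinarith
        simp only [aLoop, if_neg hcont, ansA, ansB]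
        rw [if_pos hdi0, if_neg h1, if_pos h2]
        ring
      · have hgt : i * (i + 1) < d := by
          rcases lt_or_eq_of_le hreach with h | h
          · exact h
          · exact absurd (by rw [← h, sub_self]) hdi0
        by_cases hsq : d = (i + 1) * (i + 1)
        · have hki : k = i + 1 := by
            rcases lt_trichotomy k (i + 1) with h | h | h
            · exfalso; have := sq_mono (a := k + 1) (b := i + 1) (by omega) (by omega); nlinarith
            · exact h
            · exfalso; have := sq_mono (a := i + 2) (b := k) (by omega) (by omega); nlinarith
          subst hki
          have h1 : (i + 1) * (i + 1) = d := hsq.symm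
          simp only [aLoop, if_neg hcont, ansA, ansB]
          rw [if_neg hdi0, if_pos h1]
          ring
        · have hki : k = i := by
            rcases lt_trichotomy k i with h | h | h
            · exfalso; have := sq_mono (a := k + 1) (b := i) (by omega) (by omega); nlinarith
            · exact h
            · exfalso
              have hex : d ≤ (i + 1) * (i + 1) := by nlinarith
              have hlt : d < (i + 1) * (i + 1) := lt_of_le_of_ne hex hsq
              have := sq_mono (a := i + 1) (b := k) (by omega) (by omega)
              nlinarith
          subst hki
          have h1 : ¬ (k * k = d) := by intro h; nlinarith
          have h2 : ¬ (d ≤ k * k + k) := by intro h; nlinarith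
          simp only [aLoop, if_neg hcont, ansA, ansB]
          rw [if_neg hdi0, if_neg h1, if_neg h2]
          ring

-- ===== VERDICT (by name: the statement is the Claim_ definition above) =====
theorem count_of_warp_spec : Claim_equal_count_of_warp := by
  intro points _ hpre
  obtain ⟨hlen, hle⟩ := hpre
  obtain ⟨p0, p1, rest, hpts⟩ : ∃ p0 p1 rest, points = p0 :: p1 :: rest := by
    match points, hlen with
    | a :: b :: t, _ => exact ⟨a, b, t, rfl⟩
  subst hpts
  have hle' : p0 ≤ p1 := by simpa using hle
  have e0 : PySem.List.pyGet? (p0 :: p1 :: rest) 0 = some p0 := by simp [pysem]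
  have e1 : PySem.List.pyGet? (p0 :: p1 :: rest) 1 = some p1 := by simp [pysem]
  unfold Spec_count_of_warp count_of_warp count_of_warp_alt
  rw [e0, e1]
  simp only [Option.getD_some]
  set d := p1 - p0 with hd
  have hd0 : 0 ≤ d := by omega
  by_cases hz : d = 0
  · rw [hz]; norm_num [aLoop]
  · have hd1 : 1 ≤ d := by omega
    have hbs := bSearch_spec d (d.toNat + 1) 0 d (by omega) (le_refl 0) hd0
      (by nlinarith) (by nlinarith)
    set k := bSearch (d.toNat + 1) d 0 d with hk
    obtain ⟨hk0, hk1, hk2⟩ := hbs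
    have hmain := loop_main (d.toNat + 1) d 0 k hd1 (le_refl 0) (by nlinarith)
      (by omega) hk0 hk1 hk2
    rw [show d - 0 * (0 + 1) = d by ring, show (0 : Int) + 1 = 1 by norm_num] at hmain
    unfold ansA ansB at hmain
    rw [if_neg hz]
    split_ifs at hmain ⊢ <;> omega
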